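-- pv_equiv track=rewrite | github.com/larafonse/cti-ips-2020 | 6module/delete_append_sort.py | da_sort
-- ===== SOURCE A (Python) =====
-- def da_sort(nums):
--   temp_ar = sorted(nums)
--   i, j = 0,0
--   count = 0
--   while i < len(nums):
--     if nums[i] != temp_ar[j]:
--       count+=1
--       i+=1
--     else:
--       i+=1
--       j+=1
--
--   return count
-- ===== SOURCE B (Python) =====
-- def da_sort(nums):
--     # The mismatch count equals n minus the largest k such that the k smallest
--     # values (i.e. the length-k prefix of sorted(nums)) occur in nums as a
--     # subsequence in sorted order.  Find that k by binary search with a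
--     # subsequence oracle.
--     s = sorted(nums)
--     n = len(nums)
--
--     def is_subseq(pat):
--         it = iter(nums)
--         for x in pat:
--             for y in it:
--                 if y == x:
--                     break
--             else:
--                 return False
--         return True
--
--     lo, hi = 0, n
--     while lo < hi:
--         mid = (lo + hi + 1) // 2
--         if is_subseq(s[:mid]):
--             lo = mid
--         else:
--             hi = mid - 1
--     return n - lo
-- ===== Notes on version B (the rewrite author's own statement) =====
-- stated objective: alternative
-- what changed: B binary-searches the largest k for which the k smallest values (the length-k prefix of sorted(nums)) occur as a subsequence of nums, using a subsequence oracle as the decision procedure, and returns n - k; A instead does a single two-pointer merge scan of nums against its sorted copy counting mismatches directly.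
import Mathlib
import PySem

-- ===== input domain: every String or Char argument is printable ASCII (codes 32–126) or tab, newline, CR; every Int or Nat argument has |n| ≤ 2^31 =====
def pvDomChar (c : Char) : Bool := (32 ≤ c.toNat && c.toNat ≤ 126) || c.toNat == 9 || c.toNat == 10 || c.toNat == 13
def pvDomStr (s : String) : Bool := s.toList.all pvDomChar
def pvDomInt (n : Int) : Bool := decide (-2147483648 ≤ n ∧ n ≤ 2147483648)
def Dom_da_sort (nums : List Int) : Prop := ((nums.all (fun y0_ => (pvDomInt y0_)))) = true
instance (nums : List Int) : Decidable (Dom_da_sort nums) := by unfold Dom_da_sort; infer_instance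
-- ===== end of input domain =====

-- B binary-searches the largest k such that the first k sorted values form a subsequence of
-- nums and returns n - k, instead of A's single two-pointer merge scan (alternative algorithm).


-- ===== PORT A =====
-- A's while loop: i walks nums (remaining suffix = first arg), j walks temp_ar (remaining
-- suffix = second arg); count incremented on mismatch, j advanced on match.
-- The (_ :: _, []) case is unreachable on A's actual call (j ≤ i < len(nums) = len(temp_ar)).
def daLoopA : List Int → List Int → Int → Int
  | [], _, count => count
  | _ :: _, [], count => count
  | x :: xs, t :: ts, count =>
    if x ≠ t then daLoopA xs (t :: ts) (count + 1) else daLoopA xs ts count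

def da_sort (nums : List Int) : Int :=
  daLoopA nums (PySem.List.sorted nums (fun x => x) false) 0

-- ===== PORT B =====
-- B's inner 'for y in it: if y == x: break': consume the iterator up to the first match;
-- the returned suffix starts with the match (or is empty if the iterator ran out).
def daSkipB (x : Int) : List Int → List Int
  | [] => []
  | y :: ys => if y ≠ x then daSkipB x ys else y :: ys

-- B's is_subseq: greedy subsequence test of pat against the shared iterator over nums.
def daIsSubB : List Int → List Int → Bool
  | [], _ => true
  | x :: p, xs =>
    match daSkipB x xs with
    | [] => false
    | _ :: rest => daIsSubB p rest

-- B's 'while lo < hi' binary search for the largest k with is_subseq(s[:mid]).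
def daBsB (s nums : List Int) (lo hi : Nat) : Nat :=
  if _h : lo < hi then
    let mid := (lo + hi + 1) / 2
    if daIsSubB (s.take mid) nums then daBsB s nums mid hi
    else daBsB s nums lo (mid - 1)
  else lo
termination_by hi - lo
decreasing_by all_goals omega

def da_sort_alt (nums : List Int) : Int :=
  (nums.length : Int) -
    (daBsB (PySem.List.sorted nums (fun x => x) false) nums 0 nums.length : Int)

-- ===== PRECONDITION & SPEC =====
def Spec_da_sort (nums : List Int) (out : Int) : Prop := out = da_sort_alt nums
instance (nums : List Int) (out : Int) : Decidable (Spec_da_sort nums out) := by unfold Spec_da_sort; infer_instance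

-- ===== CLAIM (what is proved, stated in full; the proofs are below) =====
def Claim_equal_da_sort : Prop := ∀ (nums : List Int), Dom_da_sort nums → Spec_da_sort nums (da_sort nums)

-- ===== LEMMAS AND PROOFS =====

-- Proof-side greedy match count: how many pattern elements of ts are matched in xs greedily.
def daG : List Int → List Int → Nat
  | [], _ => 0
  | t :: ts, xs =>
    match daSkipB t xs with
    | [] => 0
    | _ :: rest => 1 + daG ts rest

theorem daG_nil (ts : List Int) : daG ts [] = 0 := by
  cases ts <;> simp [daG, daSkipB]

theorem daG_le (ts : List Int) : ∀ xs, daG ts xs ≤ ts.length := by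
  induction ts with
  | nil => intro xs; simp [daG]
  | cons t ts ih =>
    intro xs
    simp only [daG]
    cases h : daSkipB t xs with
    | nil => simp
    | cons y rest =>
      have := ih rest
      simp only [List.length_cons]
      omega

-- A's loop equals count + |xs| - greedy matches of ts in xs (whenever ts is long enough).
theorem daLoopA_eq (xs : List Int) : ∀ (ts : List Int) (count : Int),
    xs.length ≤ ts.length →
    daLoopA xs ts count = count + (xs.length : Int) - (daG ts xs : Int) := by
  induction xs with
  | nil => intro ts count _; simp [daLoopA, daG_nil]
  | cons x xs ih =>
    intro ts count h
    cases ts with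
    | nil => simp at h
    | cons t ts =>
      simp only [List.length_cons, Nat.add_le_add_iff_right] at h
      by_cases hxt : x = t
      · subst hxt
        have hg : daG (x :: ts) (x :: xs) = 1 + daG ts xs := by
          simp [daG, daSkipB]
        rw [show daLoopA (x :: xs) (x :: ts) count = daLoopA xs ts count by simp [daLoopA],
            hg, ih ts count h]
        simp only [List.length_cons]; push_cast; ring
      · have hg : daG (t :: ts) (x :: xs) = daG (t :: ts) xs := by
          simp [daG, daSkipB, hxt]
        rw [show daLoopA (x :: xs) (t :: ts) count = daLoopA xs (t :: ts) (count + 1) by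
              simp [daLoopA, hxt],
            hg, ih (t :: ts) (count + 1) (le_trans h (Nat.le_succ _))]
        simp only [List.length_cons]; push_cast; ring

-- Characterisation: the subsequence oracle on a prefix of length k succeeds
-- iff min k |ts| ≤ greedy match count.
theorem daIsSub_char (ts : List Int) : ∀ (k : Nat) (xs : List Int),
    (daIsSubB (ts.take k) xs = true ↔ min k ts.length ≤ daG ts xs) := by
  induction ts with
  | nil => intro k xs; simp [daIsSubB, daG]
  | cons t ts ih =>
    intro k xs
    cases k with
    | zero => simp [daIsSubB]
    | succ k =>
      simp only [List.take_succ_cons, daIsSubB, daG, List.length_cons]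
      cases h : daSkipB t xs with
      | nil => simp
      | cons y rest =>
        show daIsSubB (ts.take k) rest = true ↔ min (k + 1) (ts.length + 1) ≤ 1 + daG ts rest
        rw [ih k rest]
        omega

-- Binary-search correctness: given the monotone characterisation by m, the search finds m.
theorem daBsB_eq (s nums : List Int) (m : Nat)
    (hchar : ∀ k, k ≤ s.length → (daIsSubB (s.take k) nums = true ↔ k ≤ m)) :
    ∀ (d lo hi : Nat), hi - lo ≤ d → lo ≤ m → m ≤ hi → hi ≤ s.length →
      daBsB s nums lo hi = m := by
  intro d
  induction d with
  | zero =>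
    intro lo hi hd hlo hhi _
    rw [daBsB]
    simp only
    have : ¬ lo < hi := by omega
    rw [dif_neg this]
    omega
  | succ d ih =>
    intro lo hi hd hlo hhi hle
    rw [daBsB]
    by_cases hlt : lo < hi
    · rw [dif_pos hlt]
      have hmid1 : lo < (lo + hi + 1) / 2 := by omega
      have hmid2 : (lo + hi + 1) / 2 ≤ hi := by omega
      by_cases hc : daIsSubB (s.take ((lo + hi + 1) / 2)) nums = true
      · rw [if_pos hc]
        have := (hchar _ (le_trans hmid2 hle)).mp hc
        exact ih _ _ (by omega) this hhi hle
      · rw [if_neg hc]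
        have : ¬ ((lo + hi + 1) / 2 ≤ m) := fun h =>
          hc ((hchar _ (le_trans hmid2 hle)).mpr h)
        exact ih _ _ (by omega) hlo (by omega) (by omega)
    · rw [dif_neg hlt]; omega

-- ===== VERDICT (by name: the statement is the Claim_ definition above) =====
theorem da_sort_spec : Claim_equal_da_sort := by
  intro nums _
  unfold Spec_da_sort da_sort da_sort_alt
  have hlen : (PySem.List.sorted nums (fun x => x) false).length = nums.length :=
    PySem.List.length_sorted ..
  set s := PySem.List.sorted nums (fun x => x) false with hs
  have hgle : daG s nums ≤ nums.length := by rw [← hlen]; exact daG_le s nums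
  have hbs : daBsB s nums 0 nums.length = daG s nums := by
    refine daBsB_eq s nums (daG s nums) ?_ nums.length 0 nums.length
      (by omega) (by omega) hgle (by omega)
    intro k hk
    rw [daIsSub_char]
    rw [hlen] at hk ⊢
    omega
  rw [daLoopA_eq nums s 0 (by omega), hbs]
  ring
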